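-- pv_equiv track=rewrite | github.com/daniel-reich/ubiquitous-fiesta | PirFJDfGk4vpsdkeE_14.py | help_bobby
-- ===== SOURCE A (Python) =====
-- def help_bobby(size):
--     array = [[0] * size for i in range(size)]
--     row = 0
--     for column in range(size):
--         array[row][column] = 1
--         array[row][size - column - 1] = 1
--         row += 1
--     return array
-- ===== SOURCE B (Python) =====
-- def help_bobby(size):
--     # Symmetry construction: the pattern is vertically symmetric, so build only the
--     # top half of the rows -- each directly from runs of zeros around the two ones --
--     # and mirror it; an odd size contributes a middle row with its single centre 1.
--     if size <= 0:
--         return []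
--     half = [[0] * r + [1] + [0] * (size - 2 * r - 2) + [1] + [0] * r
--             for r in range(size // 2)]
--     mid = [[0] * (size // 2) + [1] + [0] * (size // 2)] if size % 2 else []
--     return half + mid + half[::-1]
-- ===== Notes on version B (the rewrite author's own statement) =====
-- stated objective: alternative
-- what changed: Replaces the zero-matrix-plus-targeted-diagonal-writes loop by a symmetry construction: only the top half of the rows is built, each assembled directly from runs of zeros around the two ones, plus a middle row for odd sizes, and the bottom half is the mirror image; correct because the X pattern is invariant under vertical reflection.
import Mathlib
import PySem

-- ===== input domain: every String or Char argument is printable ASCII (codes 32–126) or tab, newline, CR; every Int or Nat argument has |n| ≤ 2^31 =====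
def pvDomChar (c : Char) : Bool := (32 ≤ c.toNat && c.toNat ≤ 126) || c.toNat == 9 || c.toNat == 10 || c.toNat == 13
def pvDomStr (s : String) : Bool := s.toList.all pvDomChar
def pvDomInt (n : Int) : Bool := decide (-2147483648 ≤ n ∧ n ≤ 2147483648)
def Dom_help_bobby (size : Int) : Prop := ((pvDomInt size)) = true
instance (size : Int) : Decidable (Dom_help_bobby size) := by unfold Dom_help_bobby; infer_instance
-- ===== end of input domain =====

-- B builds only the top half of the rows as zero runs around the two ones and mirrors it
-- (middle row for odd sizes), instead of A's zero matrix plus targeted diagonal writes; objective: alternative.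

-- ===== PORT A =====
-- loop body of A: two targeted writes into row `row`, then row += 1
def bobbyStep (size : Int) (st : List (List Int) × Int) (column : Int) :
    List (List Int) × Int :=
  let arr := st.1
  let row := st.2
  let arr := PySem.List.pySetD arr row
      (PySem.List.pySetD (PySem.List.pyGetD arr row []) column 1)
  let arr := PySem.List.pySetD arr row
      (PySem.List.pySetD (PySem.List.pyGetD arr row []) (size - column - 1) 1)
  (arr, row + 1)

def help_bobby (size : Int) : List (List Int) :=
  -- [[0] * size for i in range(size)]  ([0]*size = [] for size ≤ 0, = replicate size.toNat 0 otherwise)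
  let array := (PySem.List.pyRange 0 size 1).map (fun _ => List.replicate size.toNat (0 : Int))
  ((PySem.List.pyRange 0 size 1).foldl (bobbyStep size) (array, 0)).1

-- ===== PORT B =====
def help_bobby_alt (size : Int) : List (List Int) :=
  if size ≤ 0 then []
  else
    let n := size.toNat
    let half := (List.range (n / 2)).map (fun r =>
      List.replicate r (0 : Int) ++ [1] ++ List.replicate (n - 2 * r - 2) 0 ++ [1]
        ++ List.replicate r 0)
    let mid := if n % 2 = 1 then
        [List.replicate (n / 2) (0 : Int) ++ [1] ++ List.replicate (n / 2) 0] else []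
    half ++ mid ++ half.reverse

-- ===== PRECONDITION & SPEC =====
def Spec_help_bobby (size : Int) (out : List (List Int)) : Prop := out = help_bobby_alt size
instance (size : Int) (out : List (List Int)) : Decidable (Spec_help_bobby size out) := by unfold Spec_help_bobby; infer_instance

-- ===== CLAIM (what is proved, stated in full; the proofs are below) =====
def Claim_equal_help_bobby : Prop := ∀ (size : Int), Dom_help_bobby size → Spec_help_bobby size (help_bobby size)

-- ===== LEMMAS AND PROOFS =====

-- the common closed form: cell (r,c) is 1 iff c = r or c = n-1-r
def xmat (n : Nat) : List (List Int) :=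
  (List.range n).map (fun r => (List.range n).map (fun c =>
    if c = r ∨ c = n - 1 - r then (1 : Int) else 0))

-- after processing columns k,…,n-1 starting from row k, row i (k ≤ i < n) holds its
-- old content with positions i and n-1-i set to 1; rows below k are untouched
lemma bobby_fold_aux (n : Nat) : ∀ (k : Nat) (M : List (List Int)), M.length = n →
    ((PySem.List.pyRange (k : Int) (n : Int) 1).foldl (bobbyStep (n : Int)) (M, (k : Int))).1
      = M.mapIdx (fun i row => if i < k then row else (row.set i 1).set (n - 1 - i) 1) := by
  intro k
  induction' hd : n - k using Nat.strong_induction_on with d ih generalizing k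
  intro M hM
  by_cases hlt : k < n
  · have hcast : (k : Int) < (n : Int) := by exact_mod_cast hlt
    rw [PySem.List.pyRange_one_cons hcast]
    simp only [List.foldl_cons]
    have hstep : bobbyStep (n : Int) (M, (k : Int)) (k : Int)
        = (M.set k (((M.getD k []).set k 1).set (n - 1 - k) 1), ((k + 1 : Nat) : Int)) := by
      simp only [bobbyStep]
      simp only [PySem.List.pySetD_natCast, PySem.List.pyGetD_natCast]
      have h4 : (M.set k ((M.getD k []).set k 1)).getD k []
          = (M.getD k []).set k 1 := by
        rw [List.getD_eq_getElem _ _ (by simp [hM, hlt]), List.getElem_set_self]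
      rw [h4, PySem.List.pySetD_of_nonneg _ _ (by omega : (0:Int) ≤ (n : Int) - k - 1),
        (by omega : ((n : Int) - k - 1).toNat = n - 1 - k), List.set_set, Prod.mk.injEq]
      exact ⟨rfl, by push_cast; ring⟩
    rw [hstep]
    have hc1 : ((k + 1 : Nat) : Int) = (k : Int) + 1 := by push_cast; ring
    rw [← hc1, ih _ (by omega) (k + 1) rfl _ (by simpa using hM)]
    apply List.ext_getElem
    · simp
    · intro i h1 h2
      simp only [List.getElem_mapIdx]
      rcases lt_trichotomy i k with h | h | h
      · rw [if_pos h, if_pos (by omega : i < k + 1),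
          List.getElem_set_ne (by omega : k ≠ i)]
      · subst h
        rw [if_neg (by omega : ¬ i < i), if_pos (by omega : i < i + 1),
          List.getElem_set_self,
          List.getD_eq_getElem _ _ (by simpa [hM] using (by omega : i < n))]
      · rw [if_neg (by omega : ¬ i < k + 1), if_neg (by omega : ¬ i < k),
          List.getElem_set_ne (by omega : k ≠ i)]
  · rw [PySem.List.pyRange_one_eq_nil (by exact_mod_cast Nat.le_of_not_lt hlt)]
    simp only [List.foldl_nil]
    apply List.ext_getElem
    · simp
    · intro i h1 h2
      simp only [List.getElem_mapIdx]
      rw [if_pos (by omega : i < k)]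

-- A computes the closed form
lemma help_bobby_eq_xmat (n : Nat) : help_bobby (n : Int) = xmat n := by
  unfold help_bobby
  have harr : (PySem.List.pyRange 0 (n : Int) 1).map
      (fun _ => List.replicate ((n : Int)).toNat (0 : Int))
      = List.replicate n (List.replicate n (0 : Int)) := by
    apply List.ext_getElem
    · simp [PySem.List.length_pyRange_one]
    · intro i h1 h2; simp
  simp only []
  rw [harr]
  have haux := bobby_fold_aux n 0 (List.replicate n (List.replicate n (0 : Int))) (by simp)
  simp only [Nat.cast_zero] at haux
  rw [haux]
  apply List.ext_getElem
  · simp [xmat]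
  · intro i h1 h2
    have hin : i < n := by simpa using h1
    simp only [List.getElem_mapIdx, List.getElem_replicate, xmat, List.getElem_map,
      List.getElem_range, if_neg (Nat.not_lt_zero i)]
    apply List.ext_getElem
    · simp
    · intro j h3 h4
      have hjn : j < n := by simpa using h3
      simp only [List.getElem_map, List.getElem_range]
      by_cases hji : j = i ∨ j = n - 1 - i
      · rw [if_pos hji]
        rcases hji with hji | hji
        · subst hji
          by_cases h5 : j = n - 1 - j
          · simp only [← h5, List.getElem_set_self]
          · rw [List.getElem_set_ne (by omega : n - 1 - j ≠ j), List.getElem_set_self]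
        · subst hji
          rw [List.getElem_set_self]
      · push_neg at hji
        rw [if_neg (by push_neg; exact hji),
          List.getElem_set_ne (by omega : n - 1 - i ≠ j),
          List.getElem_set_ne (by omega : i ≠ j), List.getElem_replicate]

-- a row r with r < n/2 of the closed form, as zero runs around the two ones
lemma chunk_row (n r : Nat) (hr : 2 * r + 2 ≤ n) :
    (List.range n).map (fun c => if c = r ∨ c = n - 1 - r then (1 : Int) else 0)
      = List.replicate r 0 ++ [1] ++ List.replicate (n - 2 * r - 2) 0 ++ [1]
        ++ List.replicate r 0 := by
  apply List.ext_getElem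
  · simp; omega
  · intro i h1 h2
    simp only [List.getElem_map, List.getElem_range, List.getElem_append, List.getElem_replicate,
      List.length_replicate, List.length_append, List.length_cons, List.length_nil]
    split_ifs <;> simp_all <;> omega

-- the middle row of the closed form for odd n
lemma mid_chunk (n : Nat) (hodd : n % 2 = 1) :
    (List.range n).map (fun c => if c = n / 2 ∨ c = n - 1 - n / 2 then (1 : Int) else 0)
      = List.replicate (n / 2) 0 ++ [1] ++ List.replicate (n / 2) 0 := by
  apply List.ext_getElem
  · simp; omega
  · intro i h1 h2
    simp only [List.getElem_map, List.getElem_range, List.getElem_append, List.getElem_replicate,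
      List.length_replicate, List.length_append, List.length_cons, List.length_nil]
    split_ifs <;> simp_all <;> omega

-- B computes the closed form
lemma help_bobby_alt_eq_xmat (n : Nat) : help_bobby_alt (n : Int) = xmat n := by
  rcases Nat.eq_zero_or_pos n with h0 | hpos
  · subst h0; simp [help_bobby_alt, xmat]
  · rw [help_bobby_alt, if_neg (by omega)]
    simp only [Int.toNat_natCast]
    by_cases hodd : n % 2 = 1
    · rw [if_pos hodd]
      symm
      apply List.ext_getElem
      · simp [xmat]; omega
      · intro i h1 h2
        have hin : i < n := by simpa [xmat] using h1
        simp only [xmat, List.getElem_map, List.getElem_range]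
        by_cases hi1 : i < n / 2
        · rw [List.getElem_append_left (by simp; omega),
            List.getElem_append_left (by simpa using hi1)]
          simp only [List.getElem_map, List.getElem_range]
          exact chunk_row n i (by omega)
        · by_cases hmid : i = n / 2
          · rw [List.getElem_append_left (by simp; omega),
              List.getElem_append_right (by simp; omega)]
            simp only [List.length_map, List.length_range]
            have h0 : i - n / 2 = 0 := by omega
            simp only [h0, List.getElem_cons_zero]
            subst hmid
            exact mid_chunk n hodd
          · rw [List.getElem_append_right (by simp; omega), List.getElem_reverse]
            simp only [List.length_append, List.length_map, List.length_range,
              List.length_cons, List.length_nil, List.getElem_map, List.getElem_range]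
            rw [(by omega : n / 2 - 1 - (i - (n / 2 + (0 + 1))) = n - 1 - i),
              ← chunk_row n (n - 1 - i) (by omega)]
            apply List.map_congr_left
            intro c hc
            have := List.mem_range.mp hc
            split_ifs <;> omega
    · rw [if_neg hodd]
      simp only [List.append_nil]
      symm
      apply List.ext_getElem
      · simp [xmat]; omega
      · intro i h1 h2
        have hin : i < n := by simpa [xmat] using h1
        simp only [xmat, List.getElem_map, List.getElem_range]
        by_cases hi1 : i < n / 2
        · rw [List.getElem_append_left (by simpa using hi1)]
          simp only [List.getElem_map, List.getElem_range]
          exact chunk_row n i (by omega)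
        · rw [List.getElem_append_right (by simpa using (by omega : n / 2 ≤ i)),
            List.getElem_reverse]
          simp only [List.length_map, List.length_range, List.getElem_map, List.getElem_range]
          rw [(by omega : n / 2 - 1 - (i - n / 2) = n - 1 - i),
            ← chunk_row n (n - 1 - i) (by omega)]
          apply List.map_congr_left
          intro c hc
          have := List.mem_range.mp hc
          split_ifs <;> omega

theorem help_bobby_spec : Claim_equal_help_bobby := by
  intro size _
  unfold Spec_help_bobby
  by_cases hpos : 0 < size
  · obtain ⟨n, hsz⟩ : ∃ n : Nat, size = (n : Int) := ⟨size.toNat, by omega⟩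
    subst hsz
    rw [help_bobby_eq_xmat, help_bobby_alt_eq_xmat]
  · rw [help_bobby_alt, if_pos (by omega)]
    unfold help_bobby
    have hnil : PySem.List.pyRange 0 size 1 = [] :=
      PySem.List.pyRange_one_eq_nil (by omega)
    simp [hnil]
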